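-- pv_equiv track=rewrite | github.com/chaeonee/baekjoon | Python/21608_상어 초등학교.py | getSatisfaction
-- ===== SOURCE A (Python) =====
-- def getSatisfaction(N, friends, room):
-- 	dirs = [[0,-1],[0,1],[-1,0],[1,0]]
--
-- 	sat = 0
-- 	for i in range(N):
-- 		for j in range(N):
-- 			cnt = 0
-- 			if room[i][j] not in friends.keys():
-- 				continue
-- 			friend = friends[room[i][j]]
-- 			for di, dj in dirs:
-- 				di += i
-- 				dj += j
-- 				if 0 <= di < N and 0 <= dj < N and room[di][dj] in friend:
-- 					cnt += 1
--
-- 			sat = sat if cnt == 0 else sat + (10**(cnt-1))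
--
-- 	return sat
-- ===== SOURCE B (Python) =====
-- def getSatisfaction(N, friends, room):
--     counts = {}
--     for i in range(N):
--         for j in range(N):
--             v = room[i][j]
--             if j + 1 < N:
--                 w = room[i][j + 1]
--                 if v in friends and w in friends[v]:
--                     counts[(i, j)] = counts.get((i, j), 0) + 1
--                 if w in friends and v in friends[w]:
--                     counts[(i, j + 1)] = counts.get((i, j + 1), 0) + 1
--             if i + 1 < N:
--                 w = room[i + 1][j]
--                 if v in friends and w in friends[v]:
--                     counts[(i, j)] = counts.get((i, j), 0) + 1
--                 if w in friends and v in friends[w]: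
--                     counts[(i + 1, j)] = counts.get((i + 1, j), 0) + 1
--     sat = 0
--     for i in range(N):
--         for j in range(N):
--             c = counts.get((i, j), 0)
--             if c > 0:
--                 sat += 10 ** (c - 1)
--     return sat
-- ===== Notes on version B (the rewrite author's own statement) =====
-- stated objective: alternative
-- what changed: A scans all four neighbours of every cell and tests friendship inline; B first sweeps each right/down adjacency once, accumulating a per-cell like-neighbour counter in a dictionary (incrementing both endpoints per direction of the friendship), and then reduces the counter table to the score in a separate pass.
import Mathlib
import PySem

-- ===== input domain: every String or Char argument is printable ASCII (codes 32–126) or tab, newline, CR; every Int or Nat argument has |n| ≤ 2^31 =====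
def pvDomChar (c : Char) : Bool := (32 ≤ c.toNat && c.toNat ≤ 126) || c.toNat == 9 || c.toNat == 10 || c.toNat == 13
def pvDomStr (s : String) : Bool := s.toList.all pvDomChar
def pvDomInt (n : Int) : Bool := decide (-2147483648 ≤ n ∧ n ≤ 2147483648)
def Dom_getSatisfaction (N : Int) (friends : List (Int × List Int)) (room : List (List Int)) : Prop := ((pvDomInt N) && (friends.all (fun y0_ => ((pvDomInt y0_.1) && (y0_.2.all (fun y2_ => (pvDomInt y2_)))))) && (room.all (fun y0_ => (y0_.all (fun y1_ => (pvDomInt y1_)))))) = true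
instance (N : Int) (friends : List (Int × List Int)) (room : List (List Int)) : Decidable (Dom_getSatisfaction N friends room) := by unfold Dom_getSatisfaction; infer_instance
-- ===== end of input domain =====

-- B replaces A's per-cell scan of all four neighbours by a single scan of the grid's
-- right/down adjacencies that accumulates a per-cell like-neighbour count in a dictionary,
-- followed by a reduction pass (objective: alternative decomposition, not speed).

-- ===== PORT A =====
def getSatisfaction (N : Int) (friends : List (Int × List Int)) (room : List (List Int)) : Int :=
  let dirs : List (Int × Int) := [(0, -1), (0, 1), (-1, 0), (1, 0)]
  (PySem.List.pyRange 0 N 1).foldl (fun sat i =>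
    (PySem.List.pyRange 0 N 1).foldl (fun sat j =>
      if (PySem.Dict.mk friends).contains (PySem.List.pyGetD (PySem.List.pyGetD room i []) j 0) = true then
        let friend := (PySem.Dict.mk friends).getD (PySem.List.pyGetD (PySem.List.pyGetD room i []) j 0) []
        let cnt : Int := dirs.foldl (fun cnt d =>
          let di := d.1 + i
          let dj := d.2 + j
          if 0 ≤ di ∧ di < N ∧ 0 ≤ dj ∧ dj < N ∧
             PySem.List.pyGetD (PySem.List.pyGetD room di []) dj 0 ∈ friend then cnt + 1 else cnt) 0
        if cnt = 0 then sat else sat + 10 ^ (cnt - 1).toNat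
      else sat) sat) 0

-- ===== PORT B =====
-- the body of Source B's first (edge-scanning) loop nest, one cell (i, j)
def pvAltCell (N : Int) (friends : List (Int × List Int)) (room : List (List Int)) (i : Int)
    (cs : PySem.Dict (Int × Int) Int) (j : Int) : PySem.Dict (Int × Int) Int :=
  let v := PySem.List.pyGetD (PySem.List.pyGetD room i []) j 0
  let cs :=
    if j + 1 < N then
      let w := PySem.List.pyGetD (PySem.List.pyGetD room i []) (j + 1) 0
      let cs := if ((PySem.Dict.mk friends).contains v = true ∧ w ∈ (PySem.Dict.mk friends).getD v []) then cs.modify (i, j) 0 (· + 1) else cs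
      if ((PySem.Dict.mk friends).contains w = true ∧ v ∈ (PySem.Dict.mk friends).getD w []) then cs.modify (i, j + 1) 0 (· + 1) else cs
    else cs
  if i + 1 < N then
    let w := PySem.List.pyGetD (PySem.List.pyGetD room (i + 1) []) j 0
    let cs := if ((PySem.Dict.mk friends).contains v = true ∧ w ∈ (PySem.Dict.mk friends).getD v []) then cs.modify (i, j) 0 (· + 1) else cs
    if ((PySem.Dict.mk friends).contains w = true ∧ v ∈ (PySem.Dict.mk friends).getD w []) then cs.modify (i + 1, j) 0 (· + 1) else cs
  else cs

-- Source B's counts dictionary after the whole edge scan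
def pvAltCounts (N : Int) (friends : List (Int × List Int)) (room : List (List Int)) :
    PySem.Dict (Int × Int) Int :=
  (PySem.List.pyRange 0 N 1).foldl (fun cs i =>
    (PySem.List.pyRange 0 N 1).foldl (pvAltCell N friends room i) cs) PySem.Dict.empty

def getSatisfaction_alt (N : Int) (friends : List (Int × List Int)) (room : List (List Int)) : Int :=
  let counts := pvAltCounts N friends room
  (PySem.List.pyRange 0 N 1).foldl (fun sat i =>
    (PySem.List.pyRange 0 N 1).foldl (fun sat j =>
      let c := counts.getD (i, j) 0
      if 0 < c then sat + 10 ^ (c - 1).toNat else sat) sat) 0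

-- ===== PRECONDITION & SPEC =====
-- Pre_ excludes exactly the inputs on which the Python A raises IndexError: grids with
-- fewer than N rows, or a row among the first N shorter than N.
def Pre_getSatisfaction (N : Int) (friends : List (Int × List Int)) (room : List (List Int)) : Prop :=
  N.toNat ≤ room.length ∧ ∀ row ∈ room.take N.toNat, N.toNat ≤ row.length

instance (N : Int) (friends : List (Int × List Int)) (room : List (List Int)) : Decidable (Pre_getSatisfaction N friends room) := by unfold Pre_getSatisfaction; infer_instance

def pvWitness_getSatisfaction : Int × (List (Int × List Int)) × List (List Int) :=
  (2, [(1, [2, 4]), (2, [1])], [[1, 2], [3, 4]])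

def Spec_getSatisfaction (N : Int) (friends : List (Int × List Int)) (room : List (List Int)) (out : Int) : Prop := out = getSatisfaction_alt N friends room
instance (N : Int) (friends : List (Int × List Int)) (room : List (List Int)) (out : Int) : Decidable (Spec_getSatisfaction N friends room out) := by unfold Spec_getSatisfaction; infer_instance

-- ===== CLAIM (what is proved, stated in full; the proofs are below) =====
def Claim_equal_getSatisfaction : Prop := ∀ (N : Int) (friends : List (Int × List Int)) (room : List (List Int)), Dom_getSatisfaction N friends room → Pre_getSatisfaction N friends room → Spec_getSatisfaction N friends room (getSatisfaction N friends room)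

-- ===== LEMMAS AND PROOFS =====

-- 0/1 indicator of a decidable proposition
def pvInd (b : Prop) [Decidable b] : Int := if b then 1 else 0

theorem pvInd_congr {a b : Prop} [Decidable a] [Decidable b] (h : a ↔ b) : pvInd a = pvInd b := by
  simp [pvInd, h]

theorem pvInd_of_not {a : Prop} [Decidable a] (h : ¬ a) : pvInd a = 0 := by simp [pvInd, h]

theorem pvInd_and_left {a b : Prop} [Decidable a] [Decidable b] (h : a) :
    pvInd (a ∧ b) = pvInd b := pvInd_congr (and_iff_right h)

theorem pvInd_false : pvInd False = 0 := rfl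

theorem pvInd_nonneg (a : Prop) [Decidable a] : 0 ≤ pvInd a := by
  unfold pvInd; split <;> omega

theorem pv_if_add_one {b : Prop} [Decidable b] (c : Int) : (if b then c + 1 else c) = c + pvInd b := by
  unfold pvInd; split <;> omega

def pvVal (room : List (List Int)) (i j : Int) : Int :=
  PySem.List.pyGetD (PySem.List.pyGetD room i []) j 0

theorem pvVal_eq (room : List (List Int)) (i j : Int) :
    pvVal room i j = PySem.List.pyGetD (PySem.List.pyGetD room i []) j 0 := rfl

-- getD through one conditional counter bump
theorem pv_getD_condBump (cs : PySem.Dict (Int × Int) Int) (b : Prop) [Decidable b]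
    (k' k : Int × Int) :
    (if b then cs.modify k' 0 (· + 1) else cs).getD k 0 = cs.getD k 0 + pvInd (b ∧ k' = k) := by
  by_cases hb : b
  · by_cases hk : k = k'
    · subst hk; simp [hb, PySem.Dict.getD_modify_self, pvInd]
    · simp [hb, PySem.Dict.getD_modify, hk, pvInd]
      exact fun h => hk h.symm
  · simp [hb, pvInd]

-- getD through a fold whose step adds a per-event contribution
theorem pv_getD_foldl_contrib {β : Type} (L : List β)
    (step : PySem.Dict (Int × Int) Int → β → PySem.Dict (Int × Int) Int) (c : β → Int)
    (k : Int × Int) (h : ∀ d e, e ∈ L → (step d e).getD k 0 = d.getD k 0 + c e) :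
    ∀ d, (L.foldl step d).getD k 0 = d.getD k 0 + (L.map c).sum := by
  induction L with
  | nil => simp
  | cons a t ih =>
    intro d
    simp only [List.foldl_cons, List.map_cons, List.sum_cons]
    rw [ih (fun d e he => h d e (List.mem_cons_of_mem _ he)), h d a List.mem_cons_self]
    ring

-- sum of a map that vanishes except possibly at two points of a Nodup list
theorem pv_sum_map_two {L : List Int} (hnd : L.Nodup) (f : Int → Int) (t1 t2 : Int)
    (hne : t1 ≠ t2) (h : ∀ x ∈ L, x ≠ t1 → x ≠ t2 → f x = 0) :
    (L.map f).sum = (if t1 ∈ L then f t1 else 0) + (if t2 ∈ L then f t2 else 0) := by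
  induction L with
  | nil => simp
  | cons a s ih =>
    simp only [List.nodup_cons] at hnd
    rw [List.map_cons, List.sum_cons,
      ih hnd.2 (fun x hx => h x (List.mem_cons_of_mem _ hx))]
    by_cases h1 : a = t1 <;> by_cases h2 : a = t2
    · exact absurd (h1.symm.trans h2) hne
    · subst h1
      have ht2 : (t2 = a) = False := eq_false (fun h => hne h.symm)
      simp [List.mem_cons, hnd.1, ht2]
    · subst h2
      have ht1 : (t1 = a) = False := eq_false (fun h => hne h)
      simp [List.mem_cons, hnd.1, ht1]
      ring
    · have hz : f a = 0 := h a List.mem_cons_self (fun e => h1 e) (fun e => h2 e)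
      have e1 : (t1 = a) = False := eq_false (fun h => h1 h.symm)
      have e2 : (t2 = a) = False := eq_false (fun h => h2 h.symm)
      simp [List.mem_cons, e1, e2, hz]

-- per-event contribution of cell (i, j) of B's edge scan to the counter of cell (p, q)
def pvC (N : Int) (friends : List (Int × List Int)) (room : List (List Int))
    (p q i j : Int) : Int :=
    pvInd (j + 1 < N ∧ (((PySem.Dict.mk friends).contains (pvVal room i j) = true ∧ (pvVal room i (j + 1)) ∈ (PySem.Dict.mk friends).getD (pvVal room i j) []) ∧ ((i, j) : Int × Int) = (p, q)))
  + pvInd (j + 1 < N ∧ (((PySem.Dict.mk friends).contains (pvVal room i (j + 1)) = true ∧ (pvVal room i j) ∈ (PySem.Dict.mk friends).getD (pvVal room i (j + 1)) []) ∧ ((i, j + 1) : Int × Int) = (p, q)))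
  + pvInd (i + 1 < N ∧ (((PySem.Dict.mk friends).contains (pvVal room i j) = true ∧ (pvVal room (i + 1) j) ∈ (PySem.Dict.mk friends).getD (pvVal room i j) []) ∧ ((i, j) : Int × Int) = (p, q)))
  + pvInd (i + 1 < N ∧ (((PySem.Dict.mk friends).contains (pvVal room (i + 1) j) = true ∧ (pvVal room i j) ∈ (PySem.Dict.mk friends).getD (pvVal room (i + 1) j) []) ∧ ((i + 1, j) : Int × Int) = (p, q)))

theorem pv_cell_getD (N : Int) (friends : List (Int × List Int)) (room : List (List Int))
    (i p q : Int) (cs : PySem.Dict (Int × Int) Int) (j : Int) :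
    (pvAltCell N friends room i cs j).getD (p, q) 0 =
      cs.getD (p, q) 0 + pvC N friends room p q i j := by
  unfold pvAltCell pvC pvVal
  by_cases hj : j + 1 < N <;> by_cases hi : i + 1 < N <;>
    simp only [hj, hi, if_true, if_false, pv_getD_condBump,
      true_and, false_and, pvInd_false, add_zero, zero_add] <;> ring

theorem pv_counts_getD (N : Int) (friends : List (Int × List Int)) (room : List (List Int))
    (p q : Int) :
    (pvAltCounts N friends room).getD (p, q) 0 =
      ((PySem.List.pyRange 0 N 1).map (fun i =>
        ((PySem.List.pyRange 0 N 1).map (fun j => pvC N friends room p q i j)).sum)).sum := by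
  unfold pvAltCounts
  rw [pv_getD_foldl_contrib _ _
      (fun i => ((PySem.List.pyRange 0 N 1).map (fun j => pvC N friends room p q i j)).sum)
      (p, q)
      (fun d i _ => by
        rw [pv_getD_foldl_contrib _ _ (fun j => pvC N friends room p q i j) (p, q)
          (fun d j _ => pv_cell_getD N friends room i p q d j) d])
      PySem.Dict.empty,
    PySem.Dict.getD_empty, zero_add]

-- closed form of B's counter at an in-range cell (p, q)
theorem pv_counts_eval (N : Int) (friends : List (Int × List Int)) (room : List (List Int))
    (p q : Int) (hp0 : 0 ≤ p) (hpN : p < N) (hq0 : 0 ≤ q) (hqN : q < N) :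
    (pvAltCounts N friends room).getD (p, q) 0 =
        pvInd (0 ≤ q - 1 ∧ ((PySem.Dict.mk friends).contains (pvVal room p q) = true ∧ (pvVal room p (q - 1)) ∈ (PySem.Dict.mk friends).getD (pvVal room p q) []))
      + pvInd (q + 1 < N ∧ ((PySem.Dict.mk friends).contains (pvVal room p q) = true ∧ (pvVal room p (q + 1)) ∈ (PySem.Dict.mk friends).getD (pvVal room p q) []))
      + pvInd (0 ≤ p - 1 ∧ ((PySem.Dict.mk friends).contains (pvVal room p q) = true ∧ (pvVal room (p - 1) q) ∈ (PySem.Dict.mk friends).getD (pvVal room p q) []))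
      + pvInd (p + 1 < N ∧ ((PySem.Dict.mk friends).contains (pvVal room p q) = true ∧ (pvVal room (p + 1) q) ∈ (PySem.Dict.mk friends).getD (pvVal room p q) [])) := by
  rw [pv_counts_getD]
  have hnd := PySem.List.nodup_pyRange_one (a := 0) (b := N)
  -- inner sums: for each row i only columns q-1 and q can contribute
  have hinner : ∀ i : Int,
      ((PySem.List.pyRange 0 N 1).map (fun j => pvC N friends room p q i j)).sum =
        (if q - 1 ∈ PySem.List.pyRange 0 N 1 then pvC N friends room p q i (q - 1) else 0)
      + (if q ∈ PySem.List.pyRange 0 N 1 then pvC N friends room p q i q else 0) := by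
    intro i
    refine pv_sum_map_two hnd _ (q - 1) q (by omega) ?_
    intro x _ hx1 hx2
    unfold pvC
    rw [pvInd_of_not (by rintro ⟨_, _, h⟩; rw [Prod.mk.injEq] at h; exact hx2 h.2),
      pvInd_of_not (by rintro ⟨_, _, h⟩; rw [Prod.mk.injEq] at h; exact hx1 (by omega)),
      pvInd_of_not (by rintro ⟨_, _, h⟩; rw [Prod.mk.injEq] at h; exact hx2 h.2),
      pvInd_of_not (by rintro ⟨_, _, h⟩; rw [Prod.mk.injEq] at h; exact hx2 h.2)]
    ring
  rw [List.map_congr_left (fun i _ => hinner i)]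
  -- outer sum: only rows p-1 and p can contribute
  rw [pv_sum_map_two hnd _ (p - 1) p (by omega) ?side]
  case side =>
    intro x _ hx1 hx2
    have hz : ∀ j : Int, pvC N friends room p q x j = 0 := by
      intro j
      unfold pvC
      rw [pvInd_of_not (by rintro ⟨_, _, h⟩; rw [Prod.mk.injEq] at h; exact hx2 h.1),
        pvInd_of_not (by rintro ⟨_, _, h⟩; rw [Prod.mk.injEq] at h; exact hx2 h.1),
        pvInd_of_not (by rintro ⟨_, _, h⟩; rw [Prod.mk.injEq] at h; exact hx2 h.1),
        pvInd_of_not (by rintro ⟨_, _, h⟩; rw [Prod.mk.injEq] at h; exact hx1 (by omega))]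
      ring
    rw [hz, hz]
    split_ifs <;> ring
  -- now evaluate the four remaining pvC values
  have hmem : ∀ x : Int, x ∈ PySem.List.pyRange 0 N 1 ↔ 0 ≤ x ∧ x < N := fun x =>
    PySem.List.mem_pyRange_one
  have hqT : (q ∈ PySem.List.pyRange 0 N 1) = True := eq_true ((hmem q).2 ⟨hq0, hqN⟩)
  have hpT : (p ∈ PySem.List.pyRange 0 N 1) = True := eq_true ((hmem p).2 ⟨hp0, hpN⟩)
  have hC1 : pvC N friends room p q (p - 1) (q - 1) = 0 := by
    unfold pvC
    rw [pvInd_of_not (by rintro ⟨-, -, hk⟩; rw [Prod.mk.injEq] at hk; omega),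
      pvInd_of_not (by rintro ⟨-, -, hk⟩; rw [Prod.mk.injEq] at hk; omega),
      pvInd_of_not (by rintro ⟨-, -, hk⟩; rw [Prod.mk.injEq] at hk; omega),
      pvInd_of_not (by rintro ⟨-, -, hk⟩; rw [Prod.mk.injEq] at hk; omega)]
    ring
  have hC2 : pvC N friends room p q (p - 1) q =
      pvInd (((PySem.Dict.mk friends).contains (pvVal room p q) = true ∧ (pvVal room (p - 1) q) ∈ (PySem.Dict.mk friends).getD (pvVal room p q) [])) := by
    unfold pvC
    rw [show p - 1 + 1 = p from by omega,
      pvInd_of_not (by rintro ⟨-, -, hk⟩; rw [Prod.mk.injEq] at hk; omega),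
      pvInd_of_not (by rintro ⟨-, -, hk⟩; rw [Prod.mk.injEq] at hk; omega),
      pvInd_of_not (by rintro ⟨-, -, hk⟩; rw [Prod.mk.injEq] at hk; omega),
      pvInd_congr (show (p < N ∧ (((PySem.Dict.mk friends).contains (pvVal room p q) = true ∧ (pvVal room (p - 1) q) ∈ (PySem.Dict.mk friends).getD (pvVal room p q) []) ∧
          ((p, q) : Int × Int) = (p, q))) ↔
          ((PySem.Dict.mk friends).contains (pvVal room p q) = true ∧ (pvVal room (p - 1) q) ∈ (PySem.Dict.mk friends).getD (pvVal room p q) []) from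
        ⟨fun h => h.2.1, fun h => ⟨hpN, h, rfl⟩⟩)]
    ring
  have hC3 : pvC N friends room p q p (q - 1) =
      pvInd (((PySem.Dict.mk friends).contains (pvVal room p q) = true ∧ (pvVal room p (q - 1)) ∈ (PySem.Dict.mk friends).getD (pvVal room p q) [])) := by
    unfold pvC
    rw [show q - 1 + 1 = q from by omega,
      pvInd_of_not (a := (q < N ∧ (((PySem.Dict.mk friends).contains (pvVal room p (q - 1)) = true ∧ (pvVal room p q) ∈ (PySem.Dict.mk friends).getD (pvVal room p (q - 1)) []) ∧
          ((p, q - 1) : Int × Int) = (p, q))))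
        (by rintro ⟨-, -, hk⟩; rw [Prod.mk.injEq] at hk; omega),
      pvInd_of_not (a := (p + 1 < N ∧ (((PySem.Dict.mk friends).contains (pvVal room p (q - 1)) = true ∧ (pvVal room (p + 1) (q - 1)) ∈ (PySem.Dict.mk friends).getD (pvVal room p (q - 1)) []) ∧
          ((p, q - 1) : Int × Int) = (p, q))))
        (by rintro ⟨-, -, hk⟩; rw [Prod.mk.injEq] at hk; omega),
      pvInd_of_not (a := (p + 1 < N ∧ (((PySem.Dict.mk friends).contains (pvVal room (p + 1) (q - 1)) = true ∧ (pvVal room p (q - 1)) ∈ (PySem.Dict.mk friends).getD (pvVal room (p + 1) (q - 1)) []) ∧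
          ((p + 1, q - 1) : Int × Int) = (p, q))))
        (by rintro ⟨-, -, hk⟩; rw [Prod.mk.injEq] at hk; omega),
      pvInd_congr (show (q < N ∧ (((PySem.Dict.mk friends).contains (pvVal room p q) = true ∧ (pvVal room p (q - 1)) ∈ (PySem.Dict.mk friends).getD (pvVal room p q) []) ∧
          ((p, q) : Int × Int) = (p, q))) ↔
          ((PySem.Dict.mk friends).contains (pvVal room p q) = true ∧ (pvVal room p (q - 1)) ∈ (PySem.Dict.mk friends).getD (pvVal room p q) []) from
        ⟨fun h => h.2.1, fun h => ⟨hqN, h, rfl⟩⟩)]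
    ring
  have hC4 : pvC N friends room p q p q =
      pvInd (q + 1 < N ∧ ((PySem.Dict.mk friends).contains (pvVal room p q) = true ∧ (pvVal room p (q + 1)) ∈ (PySem.Dict.mk friends).getD (pvVal room p q) []))
    + pvInd (p + 1 < N ∧ ((PySem.Dict.mk friends).contains (pvVal room p q) = true ∧ (pvVal room (p + 1) q) ∈ (PySem.Dict.mk friends).getD (pvVal room p q) [])) := by
    unfold pvC
    rw [pvInd_of_not (a := (q + 1 < N ∧ (((PySem.Dict.mk friends).contains (pvVal room p (q + 1)) = true ∧ (pvVal room p q) ∈ (PySem.Dict.mk friends).getD (pvVal room p (q + 1)) []) ∧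
          ((p, q + 1) : Int × Int) = (p, q))))
        (by rintro ⟨-, -, hk⟩; rw [Prod.mk.injEq] at hk; omega),
      pvInd_of_not (a := (p + 1 < N ∧ (((PySem.Dict.mk friends).contains (pvVal room (p + 1) q) = true ∧ (pvVal room p q) ∈ (PySem.Dict.mk friends).getD (pvVal room (p + 1) q) []) ∧
          ((p + 1, q) : Int × Int) = (p, q))))
        (by rintro ⟨-, -, hk⟩; rw [Prod.mk.injEq] at hk; omega),
      pvInd_congr (show (q + 1 < N ∧ (((PySem.Dict.mk friends).contains (pvVal room p q) = true ∧ (pvVal room p (q + 1)) ∈ (PySem.Dict.mk friends).getD (pvVal room p q) []) ∧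
          ((p, q) : Int × Int) = (p, q))) ↔
          (q + 1 < N ∧ ((PySem.Dict.mk friends).contains (pvVal room p q) = true ∧ (pvVal room p (q + 1)) ∈ (PySem.Dict.mk friends).getD (pvVal room p q) [])) from
        ⟨fun h => ⟨h.1, h.2.1⟩, fun h => ⟨h.1, h.2, rfl⟩⟩),
      pvInd_congr (show (p + 1 < N ∧ (((PySem.Dict.mk friends).contains (pvVal room p q) = true ∧ (pvVal room (p + 1) q) ∈ (PySem.Dict.mk friends).getD (pvVal room p q) []) ∧
          ((p, q) : Int × Int) = (p, q))) ↔
          (p + 1 < N ∧ ((PySem.Dict.mk friends).contains (pvVal room p q) = true ∧ (pvVal room (p + 1) q) ∈ (PySem.Dict.mk friends).getD (pvVal room p q) [])) from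
        ⟨fun h => ⟨h.1, h.2.1⟩, fun h => ⟨h.1, h.2, rfl⟩⟩)]
    ring
  simp only [hqT, hpT, ite_true, hC1, hC2, hC3, hC4]
  by_cases hq1 : 0 ≤ q - 1
  · have hq1T : ((q - 1) ∈ PySem.List.pyRange 0 N 1) = True :=
      eq_true ((hmem _).2 ⟨hq1, by omega⟩)
    rw [pvInd_and_left (b := ((PySem.Dict.mk friends).contains (pvVal room p q) = true ∧ (pvVal room p (q - 1)) ∈ (PySem.Dict.mk friends).getD (pvVal room p q) [])) hq1]
    by_cases hp1 : 0 ≤ p - 1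
    · have hp1T : ((p - 1) ∈ PySem.List.pyRange 0 N 1) = True :=
        eq_true ((hmem _).2 ⟨hp1, by omega⟩)
      rw [pvInd_and_left (b := ((PySem.Dict.mk friends).contains (pvVal room p q) = true ∧ (pvVal room (p - 1) q) ∈ (PySem.Dict.mk friends).getD (pvVal room p q) [])) hp1]
      simp only [hq1T, hp1T, ite_true]
      ring
    · have hp1F : ((p - 1) ∈ PySem.List.pyRange 0 N 1) = False :=
        eq_false (fun hm => hp1 ((hmem _).1 hm).1)
      rw [pvInd_of_not (a := (0 ≤ p - 1 ∧ ((PySem.Dict.mk friends).contains (pvVal room p q) = true ∧ (pvVal room (p - 1) q) ∈ (PySem.Dict.mk friends).getD (pvVal room p q) []))) (fun h => hp1 h.1)]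
      simp only [hq1T, hp1F, ite_true, ite_false]
      ring
  · have hq1F : ((q - 1) ∈ PySem.List.pyRange 0 N 1) = False :=
      eq_false (fun hm => hq1 ((hmem _).1 hm).1)
    rw [pvInd_of_not (a := (0 ≤ q - 1 ∧ ((PySem.Dict.mk friends).contains (pvVal room p q) = true ∧ (pvVal room p (q - 1)) ∈ (PySem.Dict.mk friends).getD (pvVal room p q) []))) (fun h => hq1 h.1)]
    by_cases hp1 : 0 ≤ p - 1
    · have hp1T : ((p - 1) ∈ PySem.List.pyRange 0 N 1) = True :=
        eq_true ((hmem _).2 ⟨hp1, by omega⟩)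
      rw [pvInd_and_left (b := ((PySem.Dict.mk friends).contains (pvVal room p q) = true ∧ (pvVal room (p - 1) q) ∈ (PySem.Dict.mk friends).getD (pvVal room p q) [])) hp1]
      simp only [hq1F, hp1T, ite_true, ite_false]
      ring
    · have hp1F : ((p - 1) ∈ PySem.List.pyRange 0 N 1) = False :=
        eq_false (fun hm => hp1 ((hmem _).1 hm).1)
      rw [pvInd_of_not (a := (0 ≤ p - 1 ∧ ((PySem.Dict.mk friends).contains (pvVal room p q) = true ∧ (pvVal room (p - 1) q) ∈ (PySem.Dict.mk friends).getD (pvVal room p q) []))) (fun h => hp1 h.1)]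
      simp only [hq1F, hp1F, ite_false]
      ring

theorem pv_tail (s x : Int) (hx : 0 ≤ x) :
    (if x = 0 then s else s + 10 ^ (x - 1).toNat) =
    (if 0 < x then s + 10 ^ (x - 1).toNat else s) := by
  by_cases h : x = 0
  · simp [h]
  · simp [h, lt_of_le_of_ne hx (Ne.symm h)]

-- ===== VERDICT (by name: the statement is the Claim_ definition above) =====
theorem getSatisfaction_spec : Claim_equal_getSatisfaction := by
  unfold Claim_equal_getSatisfaction
  intro N friends room _ _
  unfold Spec_getSatisfaction
  simp only [getSatisfaction, getSatisfaction_alt]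
  apply PySem.List.foldl_congr_mem
  intro sat i hi
  apply PySem.List.foldl_congr_mem
  intro s j hj
  obtain ⟨hi0, hiN⟩ := PySem.List.mem_pyRange_one.1 hi
  obtain ⟨hj0, hjN⟩ := PySem.List.mem_pyRange_one.1 hj
  simp only [List.foldl_cons, List.foldl_nil, pv_if_add_one, zero_add, neg_add_eq_sub]
  rw [show (1 : Int) + i = i + 1 from by ring, show (1 : Int) + j = j + 1 from by ring,
    ← pvVal_eq room i j, ← pvVal_eq room i (j - 1), ← pvVal_eq room i (j + 1),
    ← pvVal_eq room (i - 1) j, ← pvVal_eq room (i + 1) j]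
  by_cases hc : (PySem.Dict.mk friends).contains (pvVal room i j) = true
  · rw [if_pos hc, pv_counts_eval N friends room i j hi0 hiN hj0 hjN,
      pvInd_congr (a := (0 ≤ i ∧ i < N ∧ 0 ≤ j - 1 ∧ j - 1 < N ∧
          pvVal room i (j - 1) ∈ (PySem.Dict.mk friends).getD (pvVal room i j) []))
        (b := (0 ≤ j - 1 ∧ ((PySem.Dict.mk friends).contains (pvVal room i j) = true ∧ (pvVal room i (j - 1)) ∈ (PySem.Dict.mk friends).getD (pvVal room i j) [])))
        ⟨fun h => ⟨h.2.2.1, hc, h.2.2.2.2⟩, fun h => ⟨hi0, hiN, h.1, by omega, h.2.2⟩⟩,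
      pvInd_congr (a := (0 ≤ i ∧ i < N ∧ 0 ≤ j + 1 ∧ j + 1 < N ∧
          pvVal room i (j + 1) ∈ (PySem.Dict.mk friends).getD (pvVal room i j) []))
        (b := (j + 1 < N ∧ ((PySem.Dict.mk friends).contains (pvVal room i j) = true ∧ (pvVal room i (j + 1)) ∈ (PySem.Dict.mk friends).getD (pvVal room i j) [])))
        ⟨fun h => ⟨h.2.2.2.1, hc, h.2.2.2.2⟩, fun h => ⟨hi0, hiN, by omega, h.1, h.2.2⟩⟩,
      pvInd_congr (a := (0 ≤ i - 1 ∧ i - 1 < N ∧ 0 ≤ j ∧ j < N ∧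
          pvVal room (i - 1) j ∈ (PySem.Dict.mk friends).getD (pvVal room i j) []))
        (b := (0 ≤ i - 1 ∧ ((PySem.Dict.mk friends).contains (pvVal room i j) = true ∧ (pvVal room (i - 1) j) ∈ (PySem.Dict.mk friends).getD (pvVal room i j) [])))
        ⟨fun h => ⟨h.1, hc, h.2.2.2.2⟩, fun h => ⟨h.1, by omega, hj0, hjN, h.2.2⟩⟩,
      pvInd_congr (a := (0 ≤ i + 1 ∧ i + 1 < N ∧ 0 ≤ j ∧ j < N ∧
          pvVal room (i + 1) j ∈ (PySem.Dict.mk friends).getD (pvVal room i j) []))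
        (b := (i + 1 < N ∧ ((PySem.Dict.mk friends).contains (pvVal room i j) = true ∧ (pvVal room (i + 1) j) ∈ (PySem.Dict.mk friends).getD (pvVal room i j) [])))
        ⟨fun h => ⟨h.2.1, hc, h.2.2.2.2⟩, fun h => ⟨by omega, h.1, hj0, hjN, h.2.2⟩⟩]
    exact pv_tail s _
      (add_nonneg (add_nonneg (add_nonneg (pvInd_nonneg _) (pvInd_nonneg _)) (pvInd_nonneg _))
        (pvInd_nonneg _))
  · rw [if_neg hc, pv_counts_eval N friends room i j hi0 hiN hj0 hjN,
      pvInd_of_not (a := (0 ≤ j - 1 ∧ ((PySem.Dict.mk friends).contains (pvVal room i j) = true ∧ (pvVal room i (j - 1)) ∈ (PySem.Dict.mk friends).getD (pvVal room i j) [])))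
        (fun h => hc h.2.1),
      pvInd_of_not (a := (j + 1 < N ∧ ((PySem.Dict.mk friends).contains (pvVal room i j) = true ∧ (pvVal room i (j + 1)) ∈ (PySem.Dict.mk friends).getD (pvVal room i j) [])))
        (fun h => hc h.2.1),
      pvInd_of_not (a := (0 ≤ i - 1 ∧ ((PySem.Dict.mk friends).contains (pvVal room i j) = true ∧ (pvVal room (i - 1) j) ∈ (PySem.Dict.mk friends).getD (pvVal room i j) [])))
        (fun h => hc h.2.1),
      pvInd_of_not (a := (i + 1 < N ∧ ((PySem.Dict.mk friends).contains (pvVal room i j) = true ∧ (pvVal room (i + 1) j) ∈ (PySem.Dict.mk friends).getD (pvVal room i j) [])))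
        (fun h => hc h.2.1)]
    norm_num
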